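-- pv_equiv track=rewrite | github.com/454335025/leetcode | 830.py | l830
-- ===== SOURCE A (Python) =====
-- def l830(S):
--     aa = []
--     i, j, N = 0, 0, len(S)
--     while j < N:
--         while j < N and S[j] == S[i]: j += 1
--         if j - i >= 3: aa.append([i, j - 1])
--         i = j
--
--     return aa
-- ===== SOURCE B (Python) =====
-- def l830(S):
--     n = len(S)
--     cuts = [i for i in range(1, n) if S[i] != S[i - 1]]
--     bounds = [0] + cuts + [n]
--     return [[a, b - 1] for a, b in zip(bounds, bounds[1:]) if b - a >= 3]
-- ===== Notes on version B (the rewrite author's own statement) =====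
-- stated objective: simpler
-- what changed: Replaced the nested two-pointer while-loop scan by two staged passes: first collect all boundary indices where S[i] != S[i-1], then pair adjacent boundaries and keep the pairs whose gap is at least 3.
import Mathlib
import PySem

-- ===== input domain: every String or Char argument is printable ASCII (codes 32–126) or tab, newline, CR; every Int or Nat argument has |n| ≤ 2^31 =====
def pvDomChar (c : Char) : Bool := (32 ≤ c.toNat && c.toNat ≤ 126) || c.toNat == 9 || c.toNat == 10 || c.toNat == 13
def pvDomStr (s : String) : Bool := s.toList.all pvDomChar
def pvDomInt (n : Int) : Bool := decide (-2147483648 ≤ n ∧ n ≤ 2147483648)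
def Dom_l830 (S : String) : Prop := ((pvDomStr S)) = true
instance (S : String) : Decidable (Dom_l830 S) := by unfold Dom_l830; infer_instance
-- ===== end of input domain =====

-- B replaces A's nested two-pointer while-loop scan by two staged passes: first
-- collect the boundary indices where S[i] != S[i-1], then pair adjacent boundaries
-- and keep the pairs whose gap is at least 3 (alternative decomposition; same cost).

-- ===== PORT A =====
-- inner while loop: 'while j < N and S[j] == S[i]: j += 1'
def l830_inner (s : List Char) (i j : Nat) : Nat :=
  if _h : j < s.length ∧ s.getD j ' ' = s.getD i ' ' then l830_inner s i (j + 1) else j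
termination_by s.length - j
decreasing_by omega

-- used by l830_outer's termination argument
theorem l830_inner_le (s : List Char) (i j : Nat) (hj : j ≤ s.length) :
    l830_inner s i j ≤ s.length := by
  fun_induction l830_inner s i j with
  | case1 j h ih => exact ih (by omega)
  | case2 j h => exact hj

-- used by l830_outer's termination argument
theorem l830_inner_ge (s : List Char) (i j : Nat) : j ≤ l830_inner s i j := by
  fun_induction l830_inner s i j with
  | case1 j h ih => omega
  | case2 j h => omega

-- outer while loop: at its head i = j always holds, state is (i, aa)
def l830_outer (s : List Char) (i : Nat) (aa : List (List Int)) : List (List Int) :=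
  if _h : i < s.length then
    let j := l830_inner s i i
    l830_outer s j (if j - i ≥ 3 then aa ++ [[(i : Int), (j : Int) - 1]] else aa)
  else aa
termination_by s.length - i
decreasing_by
  · have h1 : l830_inner s i i ≤ s.length := l830_inner_le s i i (by omega)
    have h2 : i < l830_inner s i i := by
      rw [l830_inner]
      simp only [_h, and_self, dite_true]
      have := l830_inner_ge s i (i + 1)
      omega
    omega

def l830 (S : String) : List (List Int) := l830_outer S.toList 0 []

-- ===== PORT B =====
-- cuts = [i for i in range(1, n) if S[i] != S[i-1]]   (every index is in range, so getD is exact)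
def l830_cuts (s : List Char) : List Nat :=
  (List.range' 1 (s.length - 1)).filter (fun i => s.getD i ' ' != s.getD (i - 1) ' ')

-- bounds = [0] + cuts + [n]
def l830_bounds (s : List Char) : List Int :=
  0 :: (l830_cuts s).map (fun i : Nat => (i : Int)) ++ [(s.length : Int)]

-- [[a, b - 1] for a, b in zip(bounds, bounds[1:]) if b - a >= 3]
def l830_pairs (bs : List Int) : List (List Int) :=
  (bs.zip bs.tail).filterMap (fun p => if p.2 - p.1 >= 3 then some [p.1, p.2 - 1] else none)

def l830_alt (S : String) : List (List Int) := l830_pairs (l830_bounds S.toList)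

-- ===== PRECONDITION & SPEC =====
def Spec_l830 (S : String) (out : List (List Int)) : Prop := out = l830_alt S
instance (S : String) (out : List (List Int)) : Decidable (Spec_l830 S out) := by unfold Spec_l830; infer_instance

-- ===== CLAIM (what is proved, stated in full; the proofs are below) =====
def Claim_equal_l830 : Prop := ∀ (S : String), Dom_l830 S → Spec_l830 S (l830 S)

-- ===== LEMMAS AND PROOFS =====

-- proof-side helper: the maximal runs of equal characters, as A's outer loop visits them
def l830_runs (l : List Char) : List (List Char) :=
  match l with
  | [] => []
  | c :: t => (c :: t.takeWhile (· == c)) :: l830_runs (t.dropWhile (· == c))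
termination_by l.length
decreasing_by simp; exact List.length_dropWhile_le _ _

-- proof-side helper: B's bounds list generalised by a starting offset
def l830_boundsAt (s : List Char) (off : Int) : List Int :=
  off :: (l830_cuts s).map (fun i : Nat => (i : Int) + off) ++ [off + s.length]

theorem l830_boundsAt_zero (s : List Char) : l830_boundsAt s 0 = l830_bounds s := by
  simp [l830_boundsAt, l830_bounds]

theorem l830_inner_eq (s : List Char) (i j : Nat) :
    l830_inner s i j = j + ((s.drop j).takeWhile (· == s.getD i ' ')).length := by
  fun_induction l830_inner s i j with
  | case1 j h ih =>
    obtain ⟨hj, hc⟩ := h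
    rw [ih]
    rw [List.drop_eq_getElem_cons hj]
    have hg : s[j] = s.getD j ' ' := (List.getD_eq_getElem s ' ' hj).symm
    have hb : (s.getD j ' ' == s.getD i ' ') = true := beq_iff_eq.mpr hc
    rw [hg, List.takeWhile_cons, if_pos hb]
    simp
    omega
  | case2 j h =>
    by_cases hj : j < s.length
    · have hc : ¬ s.getD j ' ' = s.getD i ' ' := fun hc => h ⟨hj, hc⟩
      rw [List.drop_eq_getElem_cons hj]
      have hg : s[j] = s.getD j ' ' := (List.getD_eq_getElem s ' ' hj).symm
      rw [hg, List.takeWhile_cons, if_neg (by simp only [beq_iff_eq]; exact hc)]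
      simp
    · rw [List.drop_eq_nil_of_le (by omega)]
      simp

-- A's loop equals a fold over the maximal runs, threading (start position, accumulator)
theorem l830_main (s : List Char) (i : Nat) (hi : i ≤ s.length) (aa : List (List Int)) :
    l830_outer s i aa =
      ((l830_runs (s.drop i)).foldl
        (fun (p : Int × List (List Int)) g =>
          let L : Int := g.length
          (p.1 + L, if L ≥ 3 then p.2 ++ [[p.1, p.1 + L - 1]] else p.2))
        ((i : Int), aa)).2 := by
  fun_induction l830_outer s i aa with
  | case1 i aa h j ih =>
    have hdrop : s.drop i = s.getD i ' ' :: s.drop (i + 1) := by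
      rw [List.drop_eq_getElem_cons h, List.getD_eq_getElem s ' ' h]
    set k := ((s.drop (i+1)).takeWhile (· == s.getD i ' ')).length with hk
    have hj : j = i + 1 + k := by
      show l830_inner s i i = _
      rw [l830_inner_eq, hdrop, List.takeWhile_cons, if_pos (by simp)]
      simp [hk]
      omega
    have hkle : k ≤ s.length - (i + 1) := by
      have h1 : k ≤ (s.drop (i+1)).length :=
        hk ▸ (List.takeWhile_sublist _).length_le
      simpa using h1
    have hjle : j ≤ s.length := by omega
    have ih' := ih hjle
    rw [dite_eq_ite] at ih'
    rw [ih', hdrop, l830_runs]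
    have hrest : (s.drop (i+1)).dropWhile (· == s.getD i ' ') = s.drop j := by
      have h2 := List.drop_left'
        (l₁ := (s.drop (i+1)).takeWhile (· == s.getD i ' '))
        (l₂ := (s.drop (i+1)).dropWhile (· == s.getD i ' ')) (i := k) hk.symm
      rw [List.takeWhile_append_dropWhile] at h2
      rw [← h2, List.drop_drop]
      congr 1
      omega
    rw [List.foldl_cons, hrest]
    congr 1
    congr 1
    refine Prod.ext ?_ ?_
    · simp only [List.length_cons]
      omega
    · simp only [List.length_cons]
      by_cases hb : j - i ≥ 3
      · rw [if_pos (by omega : ((((s.drop (i+1)).takeWhile (· == s.getD i ' ')).length + 1 : Nat) : Int) ≥ 3), if_pos hb]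
        have he : (i:Int) + ((((s.drop (i+1)).takeWhile (· == s.getD i ' ')).length + 1 : Nat) : Int) - 1 = (j:Int) - 1 := by omega
        rw [he]
      · rw [if_neg (by omega : ¬ ((((s.drop (i+1)).takeWhile (· == s.getD i ' ')).length + 1 : Nat) : Int) ≥ 3), if_neg hb]
  | case2 i aa h =>
    rw [List.drop_eq_nil_of_le (by omega), l830_runs]
    simp

theorem l830_dropWhile_head (p : Char → Bool) (t : List Char) (d : Char) (ds : List Char)
    (h : t.dropWhile p = d :: ds) : p d = false := by
  induction t with
  | nil => simp [List.dropWhile] at h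
  | cons a t ih =>
    rw [List.dropWhile_cons] at h
    by_cases hp : p a
    · rw [if_pos hp] at h; exact ih h
    · rw [if_neg hp] at h; cases h; simpa using hp

theorem l830_getD_run (c : Char) (t : List Char) (i : Nat)
    (hi : i ≤ (t.takeWhile (· == c)).length) : (c :: t).getD i ' ' = c := by
  cases i with
  | zero => rfl
  | succ j =>
    have hj : j < (t.takeWhile (· == c)).length := by omega
    rw [List.getD_cons_succ]
    conv_lhs => rw [← List.takeWhile_append_dropWhile (p := (· == c)) (l := t)]
    rw [List.getD_append _ _ _ j hj, List.getD_eq_getElem _ _ hj]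
    have := List.mem_takeWhile_imp (List.getElem_mem hj)
    simpa using this

theorem l830_getD_rest (c : Char) (t : List Char) (k : Nat) :
    (c :: t).getD ((t.takeWhile (· == c)).length + 1 + k) ' ' =
      (t.dropWhile (· == c)).getD k ' ' := by
  rw [show (t.takeWhile (· == c)).length + 1 + k = ((t.takeWhile (· == c)).length + k) + 1 by omega,
    List.getD_cons_succ]
  have h : ((t.takeWhile (· == c)) ++ (t.dropWhile (· == c))).getD
      ((t.takeWhile (· == c)).length + k) ' ' = (t.dropWhile (· == c)).getD k ' ' := by
    rw [List.getD_append_right _ _ _ _ (by omega)]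
    congr 1
    omega
  rwa [List.takeWhile_append_dropWhile] at h

theorem l830_cuts_cons (c : Char) (t : List Char) :
    l830_cuts (c :: t) =
      (if t.dropWhile (· == c) = [] then []
       else (1 + (t.takeWhile (· == c)).length) ::
         (l830_cuts (t.dropWhile (· == c))).map (· + (1 + (t.takeWhile (· == c)).length))) := by
  have hlen : t.length = (t.takeWhile (· == c)).length + (t.dropWhile (· == c)).length := by
    conv_lhs => rw [← List.takeWhile_append_dropWhile (p := (· == c)) (l := t)]
    rw [List.length_append]
  unfold l830_cuts
  simp only [List.length_cons, Nat.add_sub_cancel]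
  have hsplit : List.range' 1 t.length =
      List.range' 1 (t.takeWhile (· == c)).length ++
        List.range' (1 + (t.takeWhile (· == c)).length) (t.dropWhile (· == c)).length := by
    rw [hlen, ← List.range'_append]
    simp
  rw [hsplit, List.filter_append]
  have h1 : (List.range' 1 (t.takeWhile (· == c)).length).filter
      (fun i => (c :: t).getD i ' ' != (c :: t).getD (i - 1) ' ') = [] := by
    rw [List.filter_eq_nil_iff]
    intro a ha
    rw [List.mem_range'] at ha
    obtain ⟨k, hk, rfl⟩ := ha
    rw [l830_getD_run c t _ (by omega), l830_getD_run c t _ (by omega)]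
    simp
  rw [h1, List.nil_append]
  cases hdwe : t.dropWhile (· == c) with
  | nil => simp
  | cons d ds =>
    rw [hdwe] at hlen
    simp only [List.length_cons, reduceCtorEq]
    rw [List.range'_succ, List.filter_cons]
    have hP : ((c :: t).getD (1 + (t.takeWhile (· == c)).length) ' ' !=
        (c :: t).getD (1 + (t.takeWhile (· == c)).length - 1) ' ') = true := by
      have e1 : 1 + (t.takeWhile (· == c)).length = (t.takeWhile (· == c)).length + 1 + 0 := by omega
      rw [e1, l830_getD_rest c t 0, hdwe]
      rw [show (t.takeWhile (· == c)).length + 1 + 0 - 1 = (t.takeWhile (· == c)).length by omega]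
      rw [l830_getD_run c t _ (by omega)]
      have := l830_dropWhile_head (· == c) t d ds hdwe
      simp at this ⊢
      exact this
    rw [if_pos hP]
    congr 1
    have hmap : List.range' (1 + (t.takeWhile (· == c)).length + 1) ds.length =
        (List.range' 1 ds.length).map (fun x => (1 + (t.takeWhile (· == c)).length) + x) := by
      rw [List.map_add_range']
    have hq : ∀ a ∈ List.range' 1 ds.length,
        ((fun i => (c :: t).getD i ' ' != (c :: t).getD (i - 1) ' ') ∘
          (fun x => (1 + (t.takeWhile (· == c)).length) + x)) a =
        (fun i => (d :: ds).getD i ' ' != (d :: ds).getD (i - 1) ' ') a := by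
      intro a ha
      rw [List.mem_range'] at ha
      obtain ⟨k, hk, rfl⟩ := ha
      simp only [Function.comp]
      have e1 : 1 + (t.takeWhile (· == c)).length + (1 + 1 * k) =
          (t.takeWhile (· == c)).length + 1 + (1 + k) := by omega
      rw [e1, show (t.takeWhile (· == c)).length + 1 + (1 + k) - 1 =
          (t.takeWhile (· == c)).length + 1 + k by omega,
        l830_getD_rest c t, l830_getD_rest c t, hdwe]
      simp only [Nat.one_mul]
      rw [show 1 + k - 1 = k by omega]
    have hcuts : l830_cuts (d :: ds) =
        (List.range' 1 ds.length).filter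
          (fun i => (d :: ds).getD i ' ' != (d :: ds).getD (i - 1) ' ') := by
      unfold l830_cuts
      simp
    rw [hmap, List.filter_map, List.filter_congr hq, ← hcuts]
    exact List.map_congr_left (fun a _ => Nat.add_comm _ a)

theorem l830_pairs_cons2 (x y : Int) (l : List Int) :
    l830_pairs (x :: y :: l) = (if y - x ≥ 3 then [[x, y - 1]] else []) ++ l830_pairs (y :: l) := by
  simp only [l830_pairs, List.tail_cons, List.zip_cons_cons, List.filterMap_cons]
  split_ifs <;> simp

theorem l830_pairs_single (x : Int) : l830_pairs [x] = [] := by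
  simp [l830_pairs]

theorem l830_pairs_cons (c : Char) (t : List Char) (off : Int) :
    l830_pairs (l830_boundsAt (c :: t) off) =
      (if ((1 + (t.takeWhile (· == c)).length : Nat) : Int) ≥ 3
        then [[off, off + ((1 + (t.takeWhile (· == c)).length : Nat) : Int) - 1]] else []) ++
      l830_pairs (l830_boundsAt (t.dropWhile (· == c))
        (off + ((1 + (t.takeWhile (· == c)).length : Nat) : Int))) := by
  have hlen : t.length = (t.takeWhile (· == c)).length + (t.dropWhile (· == c)).length := by
    conv_lhs => rw [← List.takeWhile_append_dropWhile (p := (· == c)) (l := t)]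
    rw [List.length_append]
  cases hdwe : t.dropWhile (· == c) with
  | nil =>
    rw [hdwe] at hlen
    have htw : (t.takeWhile (· == c)).length = t.length := by
      simp at hlen
      omega
    have hc : l830_cuts (c :: t) = [] := by rw [l830_cuts_cons, hdwe]; simp
    have hb : l830_boundsAt (c :: t) off = [off, off + ((t.length : Int) + 1)] := by
      unfold l830_boundsAt
      rw [hc]
      simp
    have hb2 : ∀ x : Int, l830_boundsAt [] x = [x, x] := by
      intro x
      simp [l830_boundsAt, l830_cuts]
    have e2 : ((1 + t.length : Nat) : Int) = (t.length : Int) + 1 := by push_cast; ring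
    rw [hb, hb2, l830_pairs_cons2, l830_pairs_cons2, htw, e2, l830_pairs_single]
    rw [if_neg (by omega : ¬ off + ((t.length : Int) + 1) - (off + ((t.length : Int) + 1)) ≥ 3)]
    rw [show off + ((t.length : Int) + 1) - off = (t.length : Int) + 1 by ring]
    split_ifs with h1 <;> simp
  | cons d ds =>
    rw [hdwe] at hlen
    have hc : l830_cuts (c :: t) = (1 + (t.takeWhile (· == c)).length) ::
        (l830_cuts (d :: ds)).map (· + (1 + (t.takeWhile (· == c)).length)) := by
      rw [l830_cuts_cons, hdwe, if_neg (by simp)]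
    have hb : l830_boundsAt (c :: t) off =
        off :: l830_boundsAt (d :: ds) (off + ((1 + (t.takeWhile (· == c)).length : Nat) : Int)) := by
      unfold l830_boundsAt
      rw [hc]
      rw [List.map_cons, List.map_map, List.cons_append]
      congr 1
      congr 1
      · simp only [List.cons.injEq]
        refine ⟨by push_cast; ring, List.map_congr_left ?_⟩
        intro a _
        simp only [Function.comp_apply]
        push_cast
        ring
      · simp only [List.length_cons] at hlen ⊢
        congr 1
        push_cast [hlen]
        ring
    rw [hb]
    rw [show l830_boundsAt (d :: ds) (off + ((1 + (t.takeWhile (· == c)).length : Nat) : Int)) =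
      (off + ((1 + (t.takeWhile (· == c)).length : Nat) : Int)) ::
        ((l830_cuts (d :: ds)).map (fun i : Nat => (i : Int) +
          (off + ((1 + (t.takeWhile (· == c)).length : Nat) : Int))) ++
         [(off + ((1 + (t.takeWhile (· == c)).length : Nat) : Int)) + ((d :: ds).length : Int)]) from rfl]
    rw [l830_pairs_cons2, add_sub_cancel_left]

-- the run fold equals the staged bounds/pairs computation
theorem l830_fold_pairs (s : List Char) (off : Int) (acc : List (List Int)) :
    ((l830_runs s).foldl
      (fun (p : Int × List (List Int)) g =>
        let L : Int := g.length
        (p.1 + L, if L ≥ 3 then p.2 ++ [[p.1, p.1 + L - 1]] else p.2))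
      (off, acc)).2 = acc ++ l830_pairs (l830_boundsAt s off) := by
  fun_induction l830_runs s generalizing off acc with
  | case1 =>
    simp [l830_boundsAt, l830_cuts, l830_pairs]
  | case2 c t ih =>
    simp only [List.foldl_cons, List.length_cons]
    rw [show (((t.takeWhile (· == c)).length + 1 : Nat) : Int) =
      ((1 + (t.takeWhile (· == c)).length : Nat) : Int) from by push_cast; ring]
    rw [ih, l830_pairs_cons]
    split_ifs with hge
    · simp
    · simp

-- ===== VERDICT (by name: the statement is the Claim_ definition above) =====
theorem l830_spec : Claim_equal_l830 := by
  intro S _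
  show l830 S = l830_alt S
  unfold l830 l830_alt
  rw [l830_main S.toList 0 (by omega) [], List.drop_zero, l830_fold_pairs]
  simp only [Nat.cast_zero, l830_boundsAt_zero, List.nil_append]
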